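-- pv_equiv track=rewrite | github.com/rabiNyoom/Ege-Inf_2025-2026 | ФИПИ/Крылов/1 вариант/15.py | check_y
-- ===== SOURCE A (Python) =====
-- a = list(range(3, 61))
--
-- b = [d for d in range(2, 177) if 177 % d == 0]
--
-- def check_y(y):
--     c = [d for d in range(2, y) if y % d == 0]
--     if len(c) == 0:
--         return False
--     for x in range(1, 10000):
--         if not ((x in c) <= (x in a and (x not in b))):
--             return False
--     return True
-- ===== SOURCE B (Python) =====
-- ALLOWED = frozenset(range(4, 59)) | {60}
--
-- def check_y(y):
--     found = False
--     d = 2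
--     while d * d <= y:
--         if y % d == 0:
--             found = True
--             q = y // d
--             if (d < 10000 and d not in ALLOWED) or (q < 10000 and q not in ALLOWED):
--                 return False
--         d += 1
--     return found
-- ===== Notes on version B (the rewrite author's own statement) =====
-- stated objective: faster
-- what changed: B replaces A's O(y) build of the full proper-divisor list plus a fixed-range membership scan by trial division up to sqrt(y), checking each divisor and its cofactor against a precomputed allowed set.
import Mathlib
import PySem

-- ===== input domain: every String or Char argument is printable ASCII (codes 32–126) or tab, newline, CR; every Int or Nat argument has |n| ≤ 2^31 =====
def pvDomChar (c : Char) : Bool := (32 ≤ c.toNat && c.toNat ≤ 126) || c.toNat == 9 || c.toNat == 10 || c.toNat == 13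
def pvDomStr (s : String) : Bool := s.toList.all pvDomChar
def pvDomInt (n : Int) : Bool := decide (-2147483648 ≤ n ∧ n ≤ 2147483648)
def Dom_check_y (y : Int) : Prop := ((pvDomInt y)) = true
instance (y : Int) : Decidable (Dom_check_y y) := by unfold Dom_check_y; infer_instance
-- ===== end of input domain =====

-- B replaces A's full divisor-list build plus fixed-range membership scan by trial division up to √y (faster, asymptotic).

-- ===== PORT A =====
-- a = list(range(3, 61))
def pyListA : List Int := PySem.List.pyRange 3 61 1
-- b = [d for d in range(2, 177) if 177 % d == 0]
def pyListB : List Int := (PySem.List.pyRange 2 177 1).filter (fun d => PySem.Int.mod 177 d == 0)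

def check_y (y : Int) : Bool :=
  -- c = [d for d in range(2, y) if y % d == 0]
  let c := (PySem.List.pyRange 2 y 1).filter (fun d => PySem.Int.mod y d == 0)
  if c.length = 0 then false
  else
    -- for x in range(1, 10000): if not ((x in c) <= (x in a and (x not in b))): return False
    (PySem.List.pyRange 1 10000 1).all
      (fun x => !(c.contains x) || (pyListA.contains x && !(pyListB.contains x)))

-- ===== PORT B =====
-- ALLOWED = frozenset(range(4, 59)) | {60}
def allowedB : PySem.Set Int :=
  PySem.Set.union (PySem.Set.ofList (PySem.List.pyRange 4 59 1)) (PySem.Set.ofList [60])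

-- while d * d <= y: … (early 'return False' = the 'false' branch; 'found' carried as an accumulator)
def bLoop (y d : Int) (found : Bool) : Bool :=
  if _h : d * d ≤ y then
    if PySem.Int.mod y d == 0 then
      let q := PySem.Int.floordiv y d
      if (decide (d < 10000) && !(PySem.Set.contains allowedB d)) ||
         (decide (q < 10000) && !(PySem.Set.contains allowedB q)) then false
      else bLoop y (d + 1) true
    else bLoop y (d + 1) found
  else found
termination_by (y + 1 - d).toNat
decreasing_by
  all_goals
    have hdd : d ≤ d * d := by nlinarith [sq_nonneg (d - 1), sq_nonneg d]
    omega

def check_y_alt (y : Int) : Bool := bLoop y 2 false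

-- ===== PRECONDITION & SPEC =====
def Spec_check_y (y : Int) (out : Bool) : Prop := out = check_y_alt y
instance (y : Int) (out : Bool) : Decidable (Spec_check_y y out) := by unfold Spec_check_y; infer_instance

-- ===== CLAIM (what is proved, stated in full; the proofs are below) =====
def Claim_equal_check_y : Prop := ∀ (y : Int), Dom_check_y y → Spec_check_y y (check_y y)

-- ===== LEMMAS AND PROOFS =====

-- the allowed residues: a \ b = {4,…,58} ∪ {60}
def okDiv (x : Int) : Prop := (4 ≤ x ∧ x ≤ 58) ∨ x = 60

-- the common specification: y has a proper divisor, and every proper divisor < 10000 is allowed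
def PSpec (y : Int) : Prop :=
  (∃ d : Int, 2 ≤ d ∧ d < y ∧ d ∣ y) ∧
  (∀ x : Int, 2 ≤ x → x < y → x < 10000 → x ∣ y → okDiv x)

theorem pyListB_val : pyListB = [3, 59] := by decide

set_option maxRecDepth 4096 in
theorem allowedB_val : allowedB = PySem.List.pyRange 4 59 1 ++ [60] := by decide

theorem mem_allowedB (x : Int) : x ∈ allowedB ↔ okDiv x := by
  rw [allowedB_val]
  unfold okDiv
  simp [PySem.List.mem_pyRange_one]
  omega

theorem checkA_iff (y : Int) : check_y y = true ↔ PSpec y := by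
  have hmem : ∀ x : Int,
      (x ∈ (PySem.List.pyRange 2 y 1).filter (fun d => PySem.Int.mod y d == 0)) ↔
        (2 ≤ x ∧ x < y ∧ x ∣ y) := by
    intro x
    simp [List.mem_filter, PySem.List.mem_pyRange_one, PySem.Int.mod_eq_zero_iff_dvd, and_assoc]
  by_cases hc : (PySem.List.pyRange 2 y 1).filter (fun d => PySem.Int.mod y d == 0) = []
  · rw [check_y, if_pos (by simp [hc])]
    simp only [Bool.false_eq_true, false_iff]
    rintro ⟨⟨d, hd⟩, -⟩
    have : d ∈ (PySem.List.pyRange 2 y 1).filter (fun d => PySem.Int.mod y d == 0) :=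
      (hmem d).2 hd
    simp [hc] at this
  · rw [check_y, if_neg (by simp [hc])]
    simp only [List.all_eq_true, PySem.List.mem_pyRange_one, Bool.or_eq_true,
      Bool.not_eq_true', Bool.and_eq_true, List.contains_eq_mem, decide_eq_false_iff_not,
      decide_eq_true_eq, pyListB_val, pyListA, hmem]
    constructor
    · intro h
      refine ⟨?_, ?_⟩
      · obtain ⟨x, hx⟩ := List.exists_mem_of_ne_nil _ hc
        exact ⟨x, (hmem x).1 hx⟩
      · intro x h2 hxy hx4 hdvd
        have := h x ⟨by omega, by omega⟩
        rcases this with hnot | ⟨hA, hB⟩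
        · exact absurd ⟨h2, hxy, hdvd⟩ hnot
        · have hB' : ¬(x = 3 ∨ x = 59) := by simpa using hB
          unfold okDiv
          omega
    · rintro ⟨-, hall⟩ x ⟨hx1, hx2⟩
      by_cases hin : 2 ≤ x ∧ x < y ∧ x ∣ y
      · right
        have hok := hall x hin.1 hin.2.1 (by omega) hin.2.2
        unfold okDiv at hok
        constructor
        · omega
        · simp; omega
      · left; exact hin

def OkBig (x : Int) : Prop := 10000 ≤ x ∨ okDiv x

theorem dvd_of_mod_beq {y d : Int} (h : (PySem.Int.mod y d == 0) = true) : d ∣ y := by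
  rw [beq_iff_eq, PySem.Int.mod_eq_zero_iff_dvd] at h
  exact h

theorem bLoop_iff (y d : Int) (found : Bool) :
    2 ≤ d → (bLoop y d found = true ↔
      ((found = true ∨ ∃ e : Int, d ≤ e ∧ e * e ≤ y ∧ e ∣ y) ∧
       (∀ e : Int, d ≤ e → e * e ≤ y → e ∣ y → OkBig e ∧ OkBig (PySem.Int.floordiv y e)))) := by
  induction d, found using bLoop.induct y with
  | case1 d found h hmod q hbad =>
    intro hd
    rw [bLoop]
    have hbad' : (decide (d < 10000) && !allowedB.contains d ||
        decide (PySem.Int.floordiv y d < 10000) && !allowedB.contains (PySem.Int.floordiv y d)) = true := hbad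
    simp only [dif_pos h, if_pos hmod]
    rw [if_pos hbad']
    simp only [Bool.false_eq_true, false_iff]
    rintro ⟨-, hall⟩
    have hgood := hall d le_rfl h (dvd_of_mod_beq hmod)
    simp only [Bool.or_eq_true, Bool.and_eq_true, decide_eq_true_eq, Bool.not_eq_true',
      Bool.eq_false_iff] at hbad'
    rcases hbad' with ⟨h1, h2⟩ | ⟨h1, h2⟩
    · have hok : okDiv d := by simp only [OkBig, okDiv] at hgood ⊢; omega
      exact h2 ((PySem.Set.contains_iff _ _).2 ((mem_allowedB d).2 hok))
    · have hok : okDiv (PySem.Int.floordiv y d) := by simp only [OkBig, okDiv] at hgood ⊢; omega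
      exact h2 ((PySem.Set.contains_iff _ _).2 ((mem_allowedB _).2 hok))
  | case2 d found h hmod q hbad ih =>
    intro hd
    have hdvd := dvd_of_mod_beq hmod
    rw [bLoop]
    have hbad' : ¬ (decide (d < 10000) && !allowedB.contains d ||
        decide (PySem.Int.floordiv y d < 10000) && !allowedB.contains (PySem.Int.floordiv y d)) = true := hbad
    simp only [dif_pos h, if_pos hmod]
    rw [if_neg hbad']
    rw [ih (by omega)]
    simp only [Bool.or_eq_true, Bool.and_eq_true, decide_eq_true_eq, Bool.not_eq_true',
      Bool.eq_false_iff, PySem.Set.contains_iff, mem_allowedB, not_or, not_and, not_not] at hbad'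
    have hgood : OkBig d ∧ OkBig (PySem.Int.floordiv y d) := by
      unfold OkBig
      constructor
      · by_cases h1 : d < 10000
        · exact Or.inr (hbad'.1 h1)
        · exact Or.inl (by omega)
      · by_cases h2 : PySem.Int.floordiv y d < 10000
        · exact Or.inr (hbad'.2 h2)
        · exact Or.inl (by omega)
    constructor
    · rintro ⟨-, hall⟩
      refine ⟨Or.inr ⟨d, le_rfl, h, hdvd⟩, ?_⟩
      intro e he hee hedvd
      rcases eq_or_lt_of_le he with rfl | hlt
      · exact hgood
      · exact hall e (by omega) hee hedvd
    · rintro ⟨-, hall⟩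
      exact ⟨Or.inl rfl, fun e he hee hedvd => hall e (by omega) hee hedvd⟩
  | case3 d found h hmod ih =>
    intro hd
    have hndvd : ¬ d ∣ y := by
      intro hdv
      exact hmod (by rw [beq_iff_eq, PySem.Int.mod_eq_zero_iff_dvd]; exact hdv)
    rw [bLoop]
    simp only [dif_pos h, if_neg hmod]
    rw [ih (by omega)]
    constructor
    · rintro ⟨hex, hall⟩
      refine ⟨?_, ?_⟩
      · rcases hex with hf | ⟨e, he, hee, hedvd⟩
        · exact Or.inl hf
        · exact Or.inr ⟨e, by omega, hee, hedvd⟩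
      · intro e he hee hedvd
        have hne : e ≠ d := fun h' => hndvd (h' ▸ hedvd)
        exact hall e (by omega) hee hedvd
    · rintro ⟨hex, hall⟩
      refine ⟨?_, ?_⟩
      · rcases hex with hf | ⟨e, he, hee, hedvd⟩
        · exact Or.inl hf
        · have hne : e ≠ d := fun h' => hndvd (h' ▸ hedvd)
          exact Or.inr ⟨e, by omega, hee, hedvd⟩
      · exact fun e he hee hedvd => hall e (by omega) hee hedvd
  | case4 d found h =>
    intro hd
    rw [bLoop]
    simp only [dif_neg h]
    constructor
    · intro hf
      refine ⟨Or.inl hf, fun e he hee _ => ?_⟩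
      have : d * d ≤ e * e := mul_le_mul he he (by omega) (by omega)
      omega
    · rintro ⟨hf | ⟨e, he, hee, -⟩, -⟩
      · exact hf
      · have : d * d ≤ e * e := mul_le_mul he he (by omega) (by omega)
        omega

theorem floordiv_of_factor {x q y : Int} (hx : 0 < x) (hq : y = x * q) :
    PySem.Int.floordiv y x = q := by
  rw [PySem.Int.floordiv_eq_ediv_of_pos hx, hq, Int.mul_ediv_cancel_left _ (by omega)]

theorem cofactor_two_le {x q y : Int} (h2 : 2 ≤ x) (hxy : x < y) (hq : y = x * q) : 2 ≤ q := by
  rcases le_or_gt q 0 with h | h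
  · nlinarith
  · by_contra hc
    have : q = 1 := by omega
    subst this
    omega

theorem checkB_iff (y : Int) : check_y_alt y = true ↔ PSpec y := by
  unfold check_y_alt
  rw [bLoop_iff y 2 false (by norm_num)]
  simp only [Bool.false_eq_true, false_or]
  unfold PSpec
  constructor
  · rintro ⟨⟨e, he2, hee, hedvd⟩, hall⟩
    have hy4 : 4 ≤ y := by nlinarith
    constructor
    · exact ⟨e, he2, by nlinarith, hedvd⟩
    · intro x h2 hxy hx4 hxdvd
      obtain ⟨q, hq⟩ := hxdvd
      have hq2 : 2 ≤ q := cofactor_two_le h2 hxy hq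
      rcases le_or_gt x q with hle | hlt
      · have hxx : x * x ≤ y := by nlinarith
        have := hall x h2 hxx ⟨q, hq⟩
        have hfd : PySem.Int.floordiv y x = q := floordiv_of_factor (by omega) hq
        unfold OkBig at this
        rcases this.1 with hbig | hok
        · omega
        · exact hok
      · have hqq : q * q ≤ y := by nlinarith
        have hqdvd : q ∣ y := ⟨x, by rw [hq, mul_comm]⟩
        have := hall q hq2 hqq hqdvd
        have hfd : PySem.Int.floordiv y q = x := floordiv_of_factor (by omega) (by rw [hq, mul_comm])
        rw [hfd] at this
        unfold OkBig at this
        rcases this.2 with hbig | hok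
        · omega
        · exact hok
  · rintro ⟨⟨d0, hd2, hdy, hddvd⟩, hall⟩
    obtain ⟨q, hq⟩ := hddvd
    have hq2 : 2 ≤ q := cofactor_two_le hd2 hdy hq
    have hy4 : 4 ≤ y := by nlinarith
    constructor
    · rcases le_or_gt d0 q with hle | hlt
      · exact ⟨d0, hd2, by nlinarith, ⟨q, hq⟩⟩
      · exact ⟨q, hq2, by nlinarith, ⟨d0, by rw [hq, mul_comm]⟩⟩
    · intro e he2 hee hedvd
      obtain ⟨r, hr⟩ := hedvd
      have hey : e < y := by nlinarith
      have hr2 : 2 ≤ r := cofactor_two_le he2 hey hr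
      have hry : r < y := by nlinarith
      have hfd : PySem.Int.floordiv y e = r := floordiv_of_factor (by omega) hr
      rw [hfd]
      unfold OkBig
      constructor
      · by_cases hx : e < 10000
        · exact Or.inr (hall e he2 hey hx ⟨r, hr⟩)
        · exact Or.inl (by omega)
      · by_cases hx : r < 10000
        · exact Or.inr (hall r hr2 hry hx ⟨e, by rw [hr, mul_comm]⟩)
        · exact Or.inl (by omega)

-- ===== VERDICT (by name: the statement is the Claim_ definition above) =====
theorem check_y_spec : Claim_equal_check_y := by
  intro y _
  unfold Spec_check_y
  have h1 := checkA_iff y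
  have h2 := checkB_iff y
  cases hA : check_y y <;> cases hB : check_y_alt y <;> simp_all
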